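-- pv_equiv track=rewrite | github.com/ColasGael/advent_of_code | 2020/solver/day7.py | find_number_children
-- ===== SOURCE A (Python) =====
-- def find_number_children(parent, downward_inheritance, children=None):
--     if children is None:
--         children = {}
--     n_children = 0
--     for (direct_child, quantity) in downward_inheritance[parent]:
--         if direct_child not in children:
--             children[direct_child] = find_number_children(
--                 direct_child, downward_inheritance, children=children
--             )
--         n_children += quantity * (1 + children[direct_child])
--     return n_children
-- ===== SOURCE B (Python) =====
-- def find_number_children(parent, downward_inheritance, children=None):
--     # Bottom-up rounds (Kahn-style DP) instead of A's memoized recursion.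
--     # NOTE: unlike A, B does not mutate the caller's `children` dict; the
--     # equivalence claimed is about the return value only.
--     memo = dict(children) if children else {}
--     totals = {}
--     for _ in range(len(downward_inheritance) + 1):
--         changed = False
--         for node, contents in downward_inheritance.items():
--             if node in memo or node in totals:
--                 continue
--             total = 0
--             for child, quantity in contents:
--                 if child in memo:
--                     value = memo[child]
--                 elif child in totals:
--                     value = totals[child]
--                 else:
--                     total = None
--                     break
--                 total += quantity * (1 + value)
--             if total is not None:
--                 totals[node] = total
--                 changed = True
--         if not changed:
--             break
--     result = 0
--     for child, quantity in downward_inheritance[parent]: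
--         value = memo[child] if child in memo else totals[child]
--         result += quantity * (1 + value)
--     return result
-- ===== Notes on version B (the rewrite author's own statement) =====
-- stated objective: alternative
-- what changed: A's top-down memoized recursion is replaced by an iterative bottom-up dynamic program: B repeatedly sweeps the bag table, filling in the total for every bag whose direct children are already resolved, until nothing changes, then sums quantity*(1+total) over the parent's direct children; B does not mutate the caller's `children` dict (return values are identical).
import Mathlib
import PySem

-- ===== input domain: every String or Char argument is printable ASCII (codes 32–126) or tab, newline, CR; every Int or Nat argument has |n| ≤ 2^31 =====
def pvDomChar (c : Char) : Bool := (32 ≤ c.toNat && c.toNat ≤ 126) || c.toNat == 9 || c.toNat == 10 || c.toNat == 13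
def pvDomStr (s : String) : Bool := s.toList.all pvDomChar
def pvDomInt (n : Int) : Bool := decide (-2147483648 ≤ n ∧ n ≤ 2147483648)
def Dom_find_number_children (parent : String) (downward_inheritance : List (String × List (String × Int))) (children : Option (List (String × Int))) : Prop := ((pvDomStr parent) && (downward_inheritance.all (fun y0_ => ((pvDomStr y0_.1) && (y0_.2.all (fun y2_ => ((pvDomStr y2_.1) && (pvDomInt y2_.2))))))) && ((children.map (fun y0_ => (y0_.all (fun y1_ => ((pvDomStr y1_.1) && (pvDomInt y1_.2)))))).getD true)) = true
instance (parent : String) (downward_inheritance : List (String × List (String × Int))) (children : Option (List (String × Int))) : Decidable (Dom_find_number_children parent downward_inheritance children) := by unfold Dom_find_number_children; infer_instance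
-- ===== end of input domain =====

-- B replaces A's memoized recursion by bottom-up rounds of a table-filling DP (Kahn-style);
-- A mutates the caller's `children` dict, B does not: the equivalence claimed is about the return value only.

-- ===== PORT A =====
-- A's recursion is ported with a fuel counter (`G.size + 1`), which is proved sufficient on
-- every input satisfying Pre_ (outside Pre_ the Python A raises KeyError/RecursionError and
-- the fueled port returns the unclaimed default 0).
-- the `for (direct_child, quantity) in …` loop, threading (n_children, children);
-- `go` is the recursive call one level down
def fncAList (go : String → PySem.Dict String Int → Option (Int × PySem.Dict String Int))
    (lst : List (String × Int)) (n : Int) (ch : PySem.Dict String Int) :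
    Option (Int × PySem.Dict String Int) :=
  match lst with
  | [] => some (n, ch)
  | (c, q) :: rest =>
    if ch.contains c then
      fncAList go rest (n + q * (1 + ch.getD c 0)) ch    -- children[direct_child] (present)
    else
      match go c ch with
      | none => none
      | some (v, ch1) =>
        let ch2 := ch1.insert c v                        -- children[direct_child] = …
        fncAList go rest (n + q * (1 + ch2.getD c 0)) ch2

def fncA (g : PySem.Dict String (List (String × Int))) : Nat → String →
    PySem.Dict String Int → Option (Int × PySem.Dict String Int)
  | 0, _, _ => none
  | Nat.succ f', p, ch =>
    match g.get? p with
    | none => none                                   -- KeyError: downward_inheritance[parent]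
    | some lst => fncAList (fncA g f') lst 0 ch

def find_number_children (parent : String) (downward_inheritance : List (String × List (String × Int))) (children : Option (List (String × Int))) : Int :=
  let G := PySem.Dict.ofList downward_inheritance
  let C := PySem.Dict.ofList (children.getD [])          -- if children is None: children = {}
  match fncA G (G.size + 1) parent C with
  | some r => r.1
  | none => 0                                            -- unreachable under Pre_

-- ===== PORT B =====
-- the inner `for child, quantity in contents` loop with its break (`none` = broke out)
def rowSum (memo totals : PySem.Dict String Int) (contents : List (String × Int)) (acc : Int) :
    Option Int :=
  match contents with
  | [] => some acc
  | (c, q) :: rest =>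
    match memo.get? c with
    | some v => rowSum memo totals rest (acc + q * (1 + v))
    | none =>
      match totals.get? c with
      | some v => rowSum memo totals rest (acc + q * (1 + v))
      | none => none

-- one `for node, contents in downward_inheritance.items()` pass; returns (totals, changed)
def roundB (memo : PySem.Dict String Int) (items : List (String × List (String × Int)))
    (t : PySem.Dict String Int) (changed : Bool) : PySem.Dict String Int × Bool :=
  match items with
  | [] => (t, changed)
  | (node, contents) :: rest =>
    if memo.contains node || t.contains node then roundB memo rest t changed
    else
      match rowSum memo t contents 0 with
      | some s => roundB memo rest (t.insert node s) true
      | none => roundB memo rest t changed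

-- the `for _ in range(len(downward_inheritance) + 1)` loop with its `if not changed: break`
def roundsB (memo : PySem.Dict String Int) (items : List (String × List (String × Int)))
    (n : Nat) (t : PySem.Dict String Int) : PySem.Dict String Int :=
  match n with
  | 0 => t
  | Nat.succ m =>
    match roundB memo items t false with
    | (t', true) => roundsB memo items m t'
    | (t', false) => t'

-- the final `for child, quantity in downward_inheritance[parent]` loop
def finalSum (memo totals : PySem.Dict String Int) (lst : List (String × Int)) (acc : Int) : Int :=
  match lst with
  | [] => acc
  | (c, q) :: rest =>
    let v := match memo.get? c with
      | some v => v
      | none => totals.getD c 0                          -- totals[child]; present under Pre_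
    finalSum memo totals rest (acc + q * (1 + v))

def find_number_children_alt (parent : String) (downward_inheritance : List (String × List (String × Int))) (children : Option (List (String × Int))) : Int :=
  let G := PySem.Dict.ofList downward_inheritance
  let memo := PySem.Dict.ofList (children.getD [])
  let totals := roundsB memo G.items (G.size + 1) PySem.Dict.empty
  match G.get? parent with
  | none => 0                                            -- KeyError in Python B; unreachable under Pre_
  | some lst => finalSum memo totals lst 0

-- ===== PRECONDITION & SPEC =====
-- Graph helpers for Pre_: plain reachability in the input's dependency graph (which bags a
-- lookup starting from `parent` ever touches, memoized bags cut off).  These compute a set of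
-- NODES of the input by iterating the successor step to its fixpoint (size+1 steps suffice);
-- they compute no quantities/sums and simulate neither port.
def succsOf (G : PySem.Dict String (List (String × Int))) (M : PySem.Dict String Int)
    (k : String) : List String :=
  PySem.Set.ofList (((G.getD k []).map (·.1)).filter (fun c => !(M.contains c)))

def expandR (G : PySem.Dict String (List (String × Int))) (M : PySem.Dict String Int)
    (S : List String) : List String :=
  PySem.Set.update S (S.flatMap (succsOf G M))

def iterR (G : PySem.Dict String (List (String × Int))) (M : PySem.Dict String Int)
    (n : Nat) (S : List String) : List String :=
  match n with
  | 0 => S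
  | Nat.succ m => iterR G M m (expandR G M S)

def reachFrom (G : PySem.Dict String (List (String × Int))) (M : PySem.Dict String Int)
    (S : List String) : List String :=
  iterR G M (G.size + 1) S

-- Pre_ = exactly the inputs on which the Python A returns normally: every node its recursion
-- reaches is a key of downward_inheritance (else KeyError), and none of them lies on a cycle
-- of the recursion graph (else infinite recursion / RecursionError).
def Pre_find_number_children (parent : String) (downward_inheritance : List (String × List (String × Int))) (children : Option (List (String × Int))) : Prop :=
  (∀ k ∈ reachFrom (PySem.Dict.ofList downward_inheritance) (PySem.Dict.ofList (children.getD [])) (PySem.Set.ofList [parent]),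
      (PySem.Dict.ofList downward_inheritance).contains k = true) ∧
  (∀ k ∈ reachFrom (PySem.Dict.ofList downward_inheritance) (PySem.Dict.ofList (children.getD [])) (PySem.Set.ofList [parent]),
      k ∉ reachFrom (PySem.Dict.ofList downward_inheritance) (PySem.Dict.ofList (children.getD []))
            (succsOf (PySem.Dict.ofList downward_inheritance) (PySem.Dict.ofList (children.getD [])) k))

instance (parent : String) (downward_inheritance : List (String × List (String × Int))) (children : Option (List (String × Int))) : Decidable (Pre_find_number_children parent downward_inheritance children) := by unfold Pre_find_number_children; infer_instance

def pvWitness_find_number_children : String × (List (String × List (String × Int))) × (Option (List (String × Int))) :=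
  ("a", [("a", [("b", 2), ("c", 3)]), ("b", [("c", 1)]), ("c", [])], some [("c", 5)])

def Spec_find_number_children (parent : String) (downward_inheritance : List (String × List (String × Int))) (children : Option (List (String × Int))) (out : Int) : Prop := out = find_number_children_alt parent downward_inheritance children
instance (parent : String) (downward_inheritance : List (String × List (String × Int))) (children : Option (List (String × Int))) (out : Int) : Decidable (Spec_find_number_children parent downward_inheritance children out) := by unfold Spec_find_number_children; infer_instance

-- ===== CLAIM (what is proved, stated in full; the proofs are below) =====
def Claim_equal_find_number_children : Prop := ∀ (parent : String) (downward_inheritance : List (String × List (String × Int))) (children : Option (List (String × Int))), Dom_find_number_children parent downward_inheritance children → Pre_find_number_children parent downward_inheritance children → Spec_find_number_children parent downward_inheritance children (find_number_children parent downward_inheritance children)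

-- ===== LEMMAS AND PROOFS =====

-- the reference specification: fueled pure evaluation of A's (and B's) common value
mutual
def specF (G : PySem.Dict String (List (String × Int))) (M : PySem.Dict String Int)
    (f : Nat) (k : String) : Option Int :=
  match f with
  | 0 => none
  | Nat.succ f' =>
    match G.get? k with
    | none => none
    | some lst => specSum G M f' lst
termination_by (f, 0)

def specSum (G : PySem.Dict String (List (String × Int))) (M : PySem.Dict String Int)
    (f : Nat) (lst : List (String × Int)) : Option Int :=
  match lst with
  | [] => some 0
  | (c, q) :: rest =>
    match (match M.get? c with | some v => some v | none => specF G M f c) with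
    | none => none
    | some v =>
      match specSum G M f rest with
      | none => none
      | some s => some (q * (1 + v) + s)
termination_by (f, lst.length + 1)
end

theorem specSum_of_specF (G : PySem.Dict String (List (String × Int))) (M : PySem.Dict String Int)
    {f f' : Nat} (h : ∀ k v, specF G M f k = some v → specF G M f' k = some v) :
    ∀ lst s, specSum G M f lst = some s → specSum G M f' lst = some s := by
  intro lst
  induction lst with
  | nil => simp [specSum]
  | cons p rest ih =>
    obtain ⟨c, q⟩ := p
    intro s hs
    simp only [specSum] at hs ⊢
    cases hM : M.get? c with
    | some v =>
      simp only [hM] at hs ⊢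
      cases hr : specSum G M f rest with
      | none => simp [hr] at hs
      | some s' => simp only [hr] at hs; rw [ih s' hr]; exact hs
    | none =>
      simp only [hM] at hs ⊢
      cases hc : specF G M f c with
      | none => simp [hc] at hs
      | some v =>
        rw [h c v hc]
        simp only [hc] at hs
        cases hr : specSum G M f rest with
        | none => simp [hr] at hs
        | some s' => simp only [hr] at hs; rw [ih s' hr]; exact hs

theorem specF_succ_mono (G : PySem.Dict String (List (String × Int))) (M : PySem.Dict String Int) :
    ∀ f k v, specF G M f k = some v → specF G M (f + 1) k = some v := by
  intro f
  induction f with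
  | zero => intro k v h; simp [specF] at h
  | succ f ih =>
    intro k v h
    simp only [specF] at h ⊢
    cases hG : G.get? k with
    | none => simp [hG] at h
    | some lst =>
      simp only [hG] at h ⊢
      exact specSum_of_specF G M ih lst v h

theorem specF_le (G : PySem.Dict String (List (String × Int))) (M : PySem.Dict String Int)
    {f f' : Nat} (h : f ≤ f') {k v} (hs : specF G M f k = some v) : specF G M f' k = some v := by
  induction h with
  | refl => exact hs
  | step _ ih => exact specF_succ_mono G M _ _ _ ih

theorem specSum_le (G : PySem.Dict String (List (String × Int))) (M : PySem.Dict String Int)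
    {f f' : Nat} (h : f ≤ f') {lst s} (hs : specSum G M f lst = some s) :
    specSum G M f' lst = some s :=
  specSum_of_specF G M (fun _ _ hk => specF_le G M h hk) lst s hs

theorem specF_det (G : PySem.Dict String (List (String × Int))) (M : PySem.Dict String Int)
    {f f' : Nat} {k v w} (h1 : specF G M f k = some v) (h2 : specF G M f' k = some w) : v = w := by
  rcases Nat.le_total f f' with h | h
  · have := specF_le G M h h1; rw [this] at h2; exact Option.some.inj h2
  · have := specF_le G M h h2; rw [this] at h1; exact (Option.some.inj h1).symm

-- ===== A-side correctness: the fueled recursion returns the spec value and only writes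
-- spec-correct entries into the memo =====
def ExtD (G : PySem.Dict String (List (String × Int))) (M ch : PySem.Dict String Int) : Prop :=
  (∀ k v, M.get? k = some v → ch.get? k = some v) ∧
  (∀ k v, ch.get? k = some v → M.get? k = some v ∨ ∃ n, specF G M n k = some v)

theorem fncAList_correct_of (G : PySem.Dict String (List (String × Int))) (M : PySem.Dict String Int)
    (f : Nat) (go : String → PySem.Dict String Int → Option (Int × PySem.Dict String Int))
    (hA : ∀ k ch v, ExtD G M ch → specF G M f k = some v →
      ∃ ch', go k ch = some (v, ch') ∧ ExtD G M ch') :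
    ∀ lst n ch s, ExtD G M ch → specSum G M f lst = some s →
      ∃ ch', fncAList go lst n ch = some (n + s, ch') ∧ ExtD G M ch' := by
  intro lst
  induction lst with
  | nil =>
    intro n ch s hExt hs
    simp only [specSum, Option.some.injEq] at hs
    exact ⟨ch, by simp [fncAList, ← hs], hExt⟩
  | cons p rest ih =>
    obtain ⟨c, q⟩ := p
    intro n ch s hExt hs
    simp only [specSum] at hs
    cases hM : M.get? c with
    | some vc =>
      -- spec child value comes from M
      simp only [hM] at hs
      cases hr : specSum G M f rest with
      | none => simp [hr] at hs
      | some s' =>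
        simp only [hr, Option.some.injEq] at hs
        have hchc : ch.get? c = some vc := hExt.1 c vc hM
        have hcon : ch.contains c = true := by
          rw [PySem.Dict.contains_eq_isSome_get?, hchc]; rfl
        have hgetD : ch.getD c 0 = vc := PySem.Dict.getD_of_get?_eq_some _ 0 hchc
        obtain ⟨ch', h1, h2⟩ := ih (n + q * (1 + vc)) ch s' hExt hr
        refine ⟨ch', ?_, h2⟩
        simp only [fncAList, hcon, if_true, hgetD, h1]
        congr 1
        rw [← hs]; ring_nf
    | none =>
      simp only [hM] at hs
      cases hc : specF G M f c with
      | none => simp [hc] at hs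
      | some vc =>
        simp only [hc] at hs
        cases hr : specSum G M f rest with
        | none => simp [hr] at hs
        | some s' =>
          simp only [hr, Option.some.injEq] at hs
          -- c is not in the memo (else M would have it or it would be spec-correct anyway)
          by_cases hcon : ch.contains c = true
          · -- already computed earlier: its value is the spec value
            have hsome : (ch.get? c).isSome := by rw [← PySem.Dict.contains_eq_isSome_get?, hcon]
            obtain ⟨w, hw⟩ := Option.isSome_iff_exists.mp hsome
            have hwv : w = vc := by
              rcases hExt.2 c w hw with h | ⟨m, hm⟩
              · rw [h] at hM; cases hM
              · exact specF_det G M hm hc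
            have hgetD : ch.getD c 0 = vc := by
              rw [PySem.Dict.getD_of_get?_eq_some _ 0 hw, hwv]
            obtain ⟨ch', h1, h2⟩ := ih (n + q * (1 + vc)) ch s' hExt hr
            refine ⟨ch', ?_, h2⟩
            simp only [fncAList, hcon, if_true, hgetD, h1]
            congr 1
            rw [← hs]; ring_nf
          · -- recursive call, then insert
            obtain ⟨ch1, hA1, hExt1⟩ := hA c ch vc hExt hc
            have hExt2 : ExtD G M (ch1.insert c vc) := by
              constructor
              · intro k v hk
                by_cases hkc : k = c
                · rw [hkc] at hk; rw [hk] at hM; cases hM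
                · rw [PySem.Dict.get?_insert_of_ne _ _ hkc]; exact hExt1.1 k v hk
              · intro k v hk
                by_cases hkc : k = c
                · subst hkc
                  rw [PySem.Dict.get?_insert_self] at hk
                  exact Or.inr ⟨f, by rw [hc]; exact hk⟩
                · rw [PySem.Dict.get?_insert_of_ne _ _ hkc] at hk
                  exact hExt1.2 k v hk
            obtain ⟨ch', h1, h2⟩ := ih (n + q * (1 + vc)) (ch1.insert c vc) s' hExt2 hr
            refine ⟨ch', ?_, h2⟩
            have hconF : ch.contains c = false := by
              cases h : ch.contains c
              · rfl
              · exact absurd h hcon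
            simp only [fncAList, hconF, Bool.false_eq_true, if_false, hA1,
              PySem.Dict.getD_insert_self, h1]
            congr 1
            rw [← hs]; ring_nf

theorem fncA_correct (G : PySem.Dict String (List (String × Int))) (M : PySem.Dict String Int) :
    ∀ f k ch v, ExtD G M ch → specF G M f k = some v →
      ∃ ch', fncA G f k ch = some (v, ch') ∧ ExtD G M ch' := by
  intro f
  induction f with
  | zero => intro k ch v _ h; simp [specF] at h
  | succ f ih =>
    intro k ch v hExt h
    simp only [specF] at h
    cases hG : G.get? k with
    | none => simp [hG] at h
    | some lst =>
      simp only [hG] at h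
      obtain ⟨ch', h1, h2⟩ := fncAList_correct_of G M f (fncA G f) ih lst 0 ch v hExt h
      exact ⟨ch', by simp only [fncA, hG]; rw [h1]; norm_num, h2⟩

-- ===== B-side correctness: the round-based table only ever holds spec values, and after
-- enough rounds holds every value the spec resolves =====
def SoundT (G : PySem.Dict String (List (String × Int))) (M t : PySem.Dict String Int) : Prop :=
  ∀ k v, t.get? k = some v → ∃ n, specF G M n k = some v

theorem specSum_child (G : PySem.Dict String (List (String × Int))) (M : PySem.Dict String Int)
    {f : Nat} {lst : List (String × Int)} {s : Int} (h : specSum G M f lst = some s)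
    {c : String} {q : Int} (hm : (c, q) ∈ lst) (hM : M.get? c = none) :
    ∃ vc, specF G M f c = some vc := by
  induction lst generalizing s with
  | nil => cases hm
  | cons p rest ih =>
    obtain ⟨c', q'⟩ := p
    simp only [specSum] at h
    cases hMc : M.get? c' with
    | some v =>
      simp only [hMc] at h
      cases hr : specSum G M f rest with
      | none => simp [hr] at h
      | some s' =>
        rcases List.mem_cons.mp hm with he | hm'
        · obtain ⟨hc1, _⟩ := Prod.mk.inj he
          rw [hc1] at hM; rw [hM] at hMc; cases hMc
        · exact ih hr hm'
    | none =>
      simp only [hMc] at h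
      cases hcs : specF G M f c' with
      | none => simp [hcs] at h
      | some vc =>
        simp only [hcs] at h
        cases hr : specSum G M f rest with
        | none => simp [hr] at h
        | some s' =>
          rcases List.mem_cons.mp hm with he | hm'
          · obtain ⟨hc1, _⟩ := Prod.mk.inj he
            rw [hc1]; exact ⟨vc, hcs⟩
          · exact ih hr hm' 

theorem rowSum_complete (G : PySem.Dict String (List (String × Int))) (M t : PySem.Dict String Int)
    (hS : SoundT G M t) {f : Nat} {lst : List (String × Int)} {s : Int}
    (h : specSum G M f lst = some s)
    (hres : ∀ c q, (c, q) ∈ lst → M.get? c = none → (t.get? c).isSome) :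
    ∀ acc, rowSum M t lst acc = some (acc + s) := by
  induction lst generalizing s with
  | nil =>
    intro acc
    simp only [specSum, Option.some.injEq] at h
    simp [rowSum, ← h]
  | cons p rest ih =>
    obtain ⟨c, q⟩ := p
    intro acc
    simp only [specSum] at h
    cases hM : M.get? c with
    | some v =>
      simp only [hM] at h
      cases hr : specSum G M f rest with
      | none => simp [hr] at h
      | some s' =>
        simp only [hr, Option.some.injEq] at h
        have := ih hr (fun c' q' hm hM' => hres c' q' (List.mem_cons_of_mem _ hm) hM') (acc + q * (1 + v))
        simp only [rowSum, hM, this]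
        congr 1
        rw [← h]; ring
    | none =>
      simp only [hM] at h
      cases hc : specF G M f c with
      | none => simp [hc] at h
      | some vc =>
        simp only [hc] at h
        cases hr : specSum G M f rest with
        | none => simp [hr] at h
        | some s' =>
          simp only [hr, Option.some.injEq] at h
          have hsome := hres c q (List.mem_cons_self ..) hM
          obtain ⟨w, hw⟩ := Option.isSome_iff_exists.mp hsome
          obtain ⟨m, hm⟩ := hS c w hw
          have hwv : w = vc := specF_det G M hm hc
          have := ih hr (fun c' q' hmem hM' => hres c' q' (List.mem_cons_of_mem _ hmem) hM') (acc + q * (1 + vc))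
          simp only [rowSum, hM, hw, hwv, this]
          congr 1
          rw [← h]; ring

theorem rowSum_sound (G : PySem.Dict String (List (String × Int))) (M t : PySem.Dict String Int)
    (hS : SoundT G M t) {lst : List (String × Int)} {acc s : Int}
    (h : rowSum M t lst acc = some s) :
    ∃ f s0, specSum G M f lst = some s0 ∧ s = acc + s0 := by
  induction lst generalizing acc with
  | nil =>
    simp only [rowSum, Option.some.injEq] at h
    exact ⟨0, 0, by simp [specSum], by omega⟩
  | cons p rest ih =>
    obtain ⟨c, q⟩ := p
    simp only [rowSum] at h
    cases hM : M.get? c with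
    | some v =>
      simp only [hM] at h
      obtain ⟨f, s0, hspec, hse⟩ := ih h
      refine ⟨f, q * (1 + v) + s0, ?_, by rw [hse]; ring⟩
      simp [specSum, hM, hspec]
    | none =>
      simp only [hM] at h
      cases hw : t.get? c with
      | none => simp [hw] at h
      | some v =>
        simp only [hw] at h
        obtain ⟨m, hm⟩ := hS c v hw
        obtain ⟨f, s0, hspec, hse⟩ := ih h
        refine ⟨max m f, q * (1 + v) + s0, ?_, by rw [hse]; ring⟩
        have h1 : specF G M (max m f) c = some v := specF_le G M (le_max_left _ _) hm
        have h2 : specSum G M (max m f) rest = some s0 := specSum_le G M (le_max_right _ _) hspec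
        simp [specSum, hM, h1, h2]

theorem roundB_get?_mono (M : PySem.Dict String Int)
    (items : List (String × List (String × Int))) :
    ∀ t b k v, t.get? k = some v → (roundB M items t b).1.get? k = some v := by
  induction items with
  | nil => intro t b k v h; simpa [roundB]
  | cons p rest ih =>
    obtain ⟨node, contents⟩ := p
    intro t b k v h
    simp only [roundB]
    by_cases hc : (M.contains node || t.contains node) = true
    · rw [if_pos hc]; exact ih t b k v h
    · rw [if_neg hc]
      cases hrow : rowSum M t contents 0 with
      | none => exact ih t b k v h
      | some s =>
        apply ih
        have hne : k ≠ node := by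
          intro he
          subst he
          have : t.contains k = true := by rw [PySem.Dict.contains_eq_isSome_get?, h]; rfl
          simp [this] at hc
        rw [PySem.Dict.get?_insert_of_ne _ _ hne]
        exact h

theorem roundB_sound (G : PySem.Dict String (List (String × Int))) (M : PySem.Dict String Int) :
    ∀ (items : List (String × List (String × Int))) t b,
      SoundT G M t → (∀ p ∈ items, G.get? p.1 = some p.2) →
      SoundT G M (roundB M items t b).1 := by
  intro items
  induction items with
  | nil => intro t b hS _; simpa [roundB]
  | cons p rest ih =>
    obtain ⟨node, contents⟩ := p
    intro t b hS hit
    have hit' : ∀ p ∈ rest, G.get? p.1 = some p.2 := fun p hp => hit p (List.mem_cons_of_mem _ hp)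
    simp only [roundB]
    by_cases hc : (M.contains node || t.contains node) = true
    · rw [if_pos hc]; exact ih t b hS hit'
    · rw [if_neg hc]
      cases hrow : rowSum M t contents 0 with
      | none => exact ih t b hS hit'
      | some s =>
        apply ih _ _ _ hit'
        intro k v hk
        by_cases hkn : k = node
        · subst hkn
          rw [PySem.Dict.get?_insert_self] at hk
          obtain ⟨f, s0, hspec, hse⟩ := rowSum_sound G M t hS hrow
          refine ⟨f + 1, ?_⟩
          have hG : G.get? k = some contents := hit (k, contents) (List.mem_cons_self ..)
          simp only [specF, hG]
          rw [hspec, ← Option.some.inj hk, hse]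
          norm_num
        · rw [PySem.Dict.get?_insert_of_ne _ _ hkn] at hk
          exact hS k v hk

theorem roundB_append (M : PySem.Dict String Int)
    (xs ys : List (String × List (String × Int))) :
    ∀ t b, roundB M (xs ++ ys) t b = roundB M ys (roundB M xs t b).1 (roundB M xs t b).2 := by
  induction xs with
  | nil => intro t b; simp [roundB]
  | cons p rest ih =>
    obtain ⟨node, contents⟩ := p
    intro t b
    simp only [List.cons_append, roundB]
    by_cases hc : (M.contains node || t.contains node) = true
    · rw [if_pos hc, if_pos hc]; exact ih t b
    · rw [if_neg hc, if_neg hc]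
      cases hrow : rowSum M t contents 0 with
      | none => exact ih t b
      | some s => exact ih (t.insert node s) true

theorem roundB_false (M : PySem.Dict String Int) (items : List (String × List (String × Int))) :
    ∀ t b t', roundB M items t b = (t', false) → t' = t ∧ b = false := by
  induction items with
  | nil => intro t b t' h; simp only [roundB, Prod.mk.injEq] at h; exact ⟨h.1.symm, h.2⟩
  | cons p rest ih =>
    obtain ⟨node, contents⟩ := p
    intro t b t' h
    simp only [roundB] at h
    by_cases hc : (M.contains node || t.contains node) = true
    · rw [if_pos hc] at h; exact ih t b t' h
    · rw [if_neg hc] at h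
      cases hrow : rowSum M t contents 0 with
      | none => rw [hrow] at h; exact ih t b t' h
      | some s =>
        rw [hrow] at h
        have := (ih _ _ _ h).2
        cases this

theorem roundB_complete (G : PySem.Dict String (List (String × Int))) (M t : PySem.Dict String Int)
    (b : Bool) (hS : SoundT G M t)
    (hit : ∀ p ∈ G.items, G.get? p.1 = some p.2)
    {r : Nat} {k : String} {v : Int}
    (hk : specF G M (r + 1) k = some v) (hM : M.get? k = none)
    (hchild : ∀ c vc, specF G M r c = some vc → M.get? c = none → t.get? c = some vc) :
    (roundB M G.items t b).1.get? k = some v := by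
  have hk' := hk
  simp only [specF] at hk'
  cases hG : G.get? k with
  | none => simp [hG] at hk'
  | some lst =>
    simp only [hG] at hk'
    have hmem : (k, lst) ∈ G.items := PySem.Dict.mem_items_of_get?_eq_some G hG
    obtain ⟨pre, post, hsplit⟩ := List.append_of_mem hmem
    rw [hsplit, roundB_append]
    have hpre : ∀ p ∈ pre, G.get? p.1 = some p.2 := by
      intro p hp; exact hit p (by rw [hsplit]; exact List.mem_append_left _ hp)
    have ht1S : SoundT G M (roundB M pre t b).1 := roundB_sound G M pre t b hS hpre
    have ht1mono := roundB_get?_mono M pre t b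
    set t1 := (roundB M pre t b).1 with ht1
    set b1 := (roundB M pre t b).2 with hb1
    have hMk : M.contains k = false := (PySem.Dict.get?_eq_none_iff_contains M k).mp hM
    simp only [roundB]
    by_cases htc : t1.contains k = true
    · rw [if_pos (by simp [hMk, htc])]
      have hsome : (t1.get? k).isSome := by rw [← PySem.Dict.contains_eq_isSome_get?, htc]
      obtain ⟨w, hw⟩ := Option.isSome_iff_exists.mp hsome
      obtain ⟨m, hm⟩ := ht1S k w hw
      have hwv : w = v := specF_det G M hm hk
      exact roundB_get?_mono M post t1 b1 k v (hwv ▸ hw)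
    · rw [if_neg (by simp [hMk, htc])]
      have hres : ∀ c q, (c, q) ∈ lst → M.get? c = none → (t1.get? c).isSome := by
        intro c q hcm hMc
        obtain ⟨vc, hvc⟩ := specSum_child G M hk' hcm hMc
        have := ht1mono c vc (hchild c vc hvc hMc)
        rw [this]; rfl
      have hrow : rowSum M t1 lst 0 = some v := by
        have := rowSum_complete G M t1 ht1S hk' hres 0
        rw [this]; norm_num
      rw [hrow]
      exact roundB_get?_mono M post _ true k v (PySem.Dict.get?_insert_self t1 k v)

-- proof-side pure iteration of rounds (no early exit)
def itT (M : PySem.Dict String Int) (items : List (String × List (String × Int))) :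
    Nat → PySem.Dict String Int → PySem.Dict String Int
  | 0, t => t
  | Nat.succ n, t => itT M items n (roundB M items t false).1

theorem itT_fix (M : PySem.Dict String Int) (items : List (String × List (String × Int)))
    {t : PySem.Dict String Int} (h : roundB M items t false = (t, false)) :
    ∀ n, itT M items n t = t := by
  intro n
  induction n with
  | zero => rfl
  | succ n ih => simp only [itT, h]; exact ih

theorem roundsB_eq_itT (M : PySem.Dict String Int) (items : List (String × List (String × Int))) :
    ∀ n t, roundsB M items n t = itT M items n t := by
  intro n
  induction n with
  | zero => intro t; rfl
  | succ n ih =>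
    intro t
    simp only [roundsB, itT]
    cases h : roundB M items t false with
    | mk t' b =>
      cases b with
      | true => exact ih t'
      | false =>
        obtain ⟨ht', _⟩ := roundB_false M items t false t' h
        subst ht'
        exact (itT_fix M items h n).symm

theorem itT_comm (M : PySem.Dict String Int) (items : List (String × List (String × Int))) :
    ∀ n t, itT M items (n + 1) t = (roundB M items (itT M items n t) false).1 := by
  intro n
  induction n with
  | zero => intro t; rfl
  | succ n ih => intro t; simp only [itT] at ih ⊢; exact ih _

theorem itT_sound (G : PySem.Dict String (List (String × Int))) (M : PySem.Dict String Int)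
    (hit : ∀ p ∈ G.items, G.get? p.1 = some p.2) :
    ∀ n t, SoundT G M t → SoundT G M (itT M G.items n t) := by
  intro n
  induction n with
  | zero => intro t h; exact h
  | succ n ih =>
    intro t h
    simp only [itT]
    exact ih _ (roundB_sound G M G.items t false h hit)

theorem itT_complete (G : PySem.Dict String (List (String × Int))) (M : PySem.Dict String Int)
    (hit : ∀ p ∈ G.items, G.get? p.1 = some p.2) :
    ∀ (r : Nat) t, SoundT G M t → ∀ k v, specF G M r k = some v → M.get? k = none →
      (itT M G.items r t).get? k = some v := by
  intro r
  induction r with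
  | zero => intro t _ k v h _; simp [specF] at h
  | succ r ih =>
    intro t hS k v hk hM
    rw [itT_comm]
    exact roundB_complete G M _ false (itT_sound G M hit r t hS) hit hk hM
      (fun c vc hc hMc => ih t hS c vc hc hMc)

-- ===== the graph layer: under Pre_, reachability is a fixpoint and gives a decreasing rank =====
def descOf (G : PySem.Dict String (List (String × Int))) (M : PySem.Dict String Int)
    (k : String) : List String :=
  reachFrom G M (succsOf G M k)

theorem nodup_succsOf (G : PySem.Dict String (List (String × Int))) (M : PySem.Dict String Int)
    (k : String) : (succsOf G M k).Nodup := PySem.Set.nodup_ofList _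

theorem mem_expandR (G : PySem.Dict String (List (String × Int))) (M : PySem.Dict String Int)
    (S : List String) (x : String) :
    x ∈ expandR G M S ↔ x ∈ S ∨ ∃ k ∈ S, x ∈ succsOf G M k := by
  simp [expandR, PySem.Set.mem_update, List.mem_flatMap]

theorem subset_expandR (G : PySem.Dict String (List (String × Int))) (M : PySem.Dict String Int)
    (S : List String) : S ⊆ expandR G M S := by
  intro x hx; rw [mem_expandR]; exact Or.inl hx

theorem subset_iterR (G : PySem.Dict String (List (String × Int))) (M : PySem.Dict String Int) :
    ∀ n S, S ⊆ iterR G M n S := by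
  intro n
  induction n with
  | zero => intro S; exact fun x hx => hx
  | succ n ih =>
    intro S
    exact fun x hx => ih (expandR G M S) (subset_expandR G M S hx)

theorem iterR_subset_closed (G : PySem.Dict String (List (String × Int))) (M : PySem.Dict String Int)
    (T : List String) (hT : ∀ k ∈ T, ∀ c ∈ succsOf G M k, c ∈ T) :
    ∀ n S, S ⊆ T → iterR G M n S ⊆ T := by
  intro n
  induction n with
  | zero => intro S h; exact h
  | succ n ih =>
    intro S h
    apply ih
    intro x hx
    rcases (mem_expandR G M S x).mp hx with hx | ⟨k, hk, hs⟩
    · exact h hx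
    · exact hT k (h hk) x hs

theorem nodup_iterR (G : PySem.Dict String (List (String × Int))) (M : PySem.Dict String Int) :
    ∀ n S, S.Nodup → (iterR G M n S).Nodup := by
  intro n
  induction n with
  | zero => intro S h; exact h
  | succ n ih => intro S h; exact ih _ (PySem.Set.nodup_update _ _ h)

theorem iterR_of_fix (G : PySem.Dict String (List (String × Int))) (M : PySem.Dict String Int)
    {S : List String} (h : expandR G M S = S) : ∀ n, iterR G M n S = S := by
  intro n
  induction n with
  | zero => rfl
  | succ n ih => simp only [iterR, h]; exact ih

theorem length_lt_expandR (G : PySem.Dict String (List (String × Int))) (M : PySem.Dict String Int)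
    {S : List String} (h : expandR G M S ≠ S) : S.length < (expandR G M S).length := by
  unfold expandR at *
  rw [PySem.Set.update_eq_append_filter] at *
  cases hf : (PySem.Set.ofList (S.flatMap (succsOf G M))).filter (fun y => !(PySem.Set.contains S y)) with
  | nil => rw [hf] at h; simp at h
  | cons a l => simp

theorem fix_or_grow (G : PySem.Dict String (List (String × Int))) (M : PySem.Dict String Int) :
    ∀ n S, expandR G M (iterR G M n S) = iterR G M n S ∨
      S.length + n ≤ (iterR G M n S).length := by
  intro n
  induction n with
  | zero => intro S; right; simp only [iterR]; omega
  | succ n ih =>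
    intro S
    by_cases h : expandR G M S = S
    · left
      simp only [iterR, h, iterR_of_fix G M h n]
    · rcases ih (expandR G M S) with hfix | hlen
      · left; simpa only [iterR] using hfix
      · right
        simp only [iterR]
        have := length_lt_expandR G M h
        omega

theorem keys_length_eq_size (G : PySem.Dict String (List (String × Int))) :
    G.keys.length = G.size := by
  simp [PySem.Dict.keys, PySem.Dict.size]

theorem reach_fix (G : PySem.Dict String (List (String × Int))) (M : PySem.Dict String Int)
    {S : List String} (hnd : S.Nodup)
    (hsub : reachFrom G M S ⊆ G.keys) :
    expandR G M (reachFrom G M S) = reachFrom G M S := by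
  unfold reachFrom at *
  rcases fix_or_grow G M (G.size + 1) S with h | h
  · exact h
  · exfalso
    have hnd' : (iterR G M (G.size + 1) S).Nodup := nodup_iterR G M _ S hnd
    have := (hnd'.subperm hsub).length_le
    rw [keys_length_eq_size] at this
    omega

theorem reach_closed (G : PySem.Dict String (List (String × Int))) (M : PySem.Dict String Int)
    {S : List String} (hnd : S.Nodup)
    (hsub : reachFrom G M S ⊆ G.keys) :
    ∀ k ∈ reachFrom G M S, ∀ c ∈ succsOf G M k, c ∈ reachFrom G M S := by
  intro k hk c hc
  have hfix := reach_fix G M hnd hsub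
  rw [← hfix, mem_expandR]
  exact Or.inr ⟨k, hk, hc⟩

theorem desc_subset (G : PySem.Dict String (List (String × Int))) (M : PySem.Dict String Int)
    {R : List String} (hRclosed : ∀ k ∈ R, ∀ c ∈ succsOf G M k, c ∈ R)
    {k : String} (hk : k ∈ R) : descOf G M k ⊆ R :=
  iterR_subset_closed G M R hRclosed _ _ (hRclosed k hk)

theorem desc_lt (G : PySem.Dict String (List (String × Int))) (M : PySem.Dict String Int)
    {R : List String} (hRclosed : ∀ k ∈ R, ∀ c ∈ succsOf G M k, c ∈ R)
    (hRkeys : R ⊆ G.keys) (hR2 : ∀ k ∈ R, k ∉ descOf G M k)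
    {k c : String} (hk : k ∈ R) (hc : c ∈ succsOf G M k) :
    (descOf G M c).length < (descOf G M k).length := by
  have hdk_sub : descOf G M k ⊆ G.keys := fun x hx => hRkeys (desc_subset G M hRclosed hk hx)
  have hdk_closed := reach_closed G M (nodup_succsOf G M k) hdk_sub
  have hcd : c ∈ descOf G M k := subset_iterR G M _ _ hc
  have hdc_sub : descOf G M c ⊆ descOf G M k :=
    iterR_subset_closed G M (descOf G M k) hdk_closed _ _ (hdk_closed c hcd)
  have hcR : c ∈ R := hRclosed k hk c hc
  have hcnot : c ∉ descOf G M c := hR2 c hcR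
  have hnd_c : (descOf G M c).Nodup := nodup_iterR G M _ _ (nodup_succsOf G M c)
  have hnd_cons : (c :: descOf G M c).Nodup := List.nodup_cons.mpr ⟨hcnot, hnd_c⟩
  have hsub_cons : (c :: descOf G M c) ⊆ descOf G M k := by
    intro x hx
    rcases List.mem_cons.mp hx with rfl | hx
    · exact hcd
    · exact hdc_sub hx
  have := (hnd_cons.subperm hsub_cons).length_le
  simpa using this

theorem specSum_exists (G : PySem.Dict String (List (String × Int))) (M : PySem.Dict String Int)
    {f : Nat} :
    ∀ {lst : List (String × Int)},
      (∀ c q, (c, q) ∈ lst → M.get? c = none → ∃ vc, specF G M f c = some vc) →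
      ∃ s, specSum G M f lst = some s := by
  intro lst
  induction lst with
  | nil => intro _; exact ⟨0, by simp [specSum]⟩
  | cons p rest ih =>
    obtain ⟨c, q⟩ := p
    intro h
    obtain ⟨s', hs'⟩ := ih (fun c' q' hm hM => h c' q' (List.mem_cons_of_mem _ hm) hM)
    cases hM : M.get? c with
    | some v => exact ⟨q * (1 + v) + s', by simp [specSum, hM, hs']⟩
    | none =>
      obtain ⟨vc, hvc⟩ := h c q (List.mem_cons_self ..) hM
      exact ⟨q * (1 + vc) + s', by simp [specSum, hM, hvc, hs']⟩

theorem spec_exists (G : PySem.Dict String (List (String × Int))) (M : PySem.Dict String Int)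
    {R : List String} (hRclosed : ∀ k ∈ R, ∀ c ∈ succsOf G M k, c ∈ R)
    (hRkeys : R ⊆ G.keys) (hR2 : ∀ k ∈ R, k ∉ descOf G M k) :
    ∀ (N : Nat) (k : String), k ∈ R → (descOf G M k).length < N →
      ∃ v, specF G M ((descOf G M k).length + 1) k = some v := by
  intro N
  induction N with
  | zero => intro k _ h; omega
  | succ N ih =>
    intro k hk hlt
    have hcon : G.contains k = true := by
      rw [PySem.Dict.contains_iff_mem_keys]; exact hRkeys hk
    have hsomeg : (G.get? k).isSome := by rw [← PySem.Dict.contains_eq_isSome_get?, hcon]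
    obtain ⟨lst, hG⟩ := Option.isSome_iff_exists.mp hsomeg
    have hgetD : G.getD k [] = lst := PySem.Dict.getD_of_get?_eq_some G [] hG
    have hchild : ∀ c q, (c, q) ∈ lst → M.get? c = none →
        ∃ vc, specF G M ((descOf G M k).length) c = some vc := by
      intro c q hm hM
      have hcs : c ∈ succsOf G M k := by
        unfold succsOf
        rw [PySem.Set.mem_ofList, List.mem_filter, hgetD]
        constructor
        · exact List.mem_map.mpr ⟨(c, q), hm, rfl⟩
        · rw [(PySem.Dict.get?_eq_none_iff_contains M c).mp hM]; rfl
      have hlt' := desc_lt G M hRclosed hRkeys hR2 hk hcs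
      obtain ⟨vc, hvc⟩ := ih c (hRclosed k hk c hcs) (by omega)
      exact ⟨vc, specF_le G M (by omega) hvc⟩
    obtain ⟨s, hs⟩ := specSum_exists G M hchild
    exact ⟨s, by simp [specF, hG, hs]⟩

theorem finalSum_spec (G : PySem.Dict String (List (String × Int))) (M T : PySem.Dict String Int)
    {f : Nat} :
    ∀ {lst : List (String × Int)} {s : Int},
      specSum G M f lst = some s →
      (∀ c q vc, (c, q) ∈ lst → M.get? c = none → specF G M f c = some vc → T.get? c = some vc) →
      ∀ acc, finalSum M T lst acc = acc + s := by
  intro lst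
  induction lst with
  | nil =>
    intro s h _ acc
    simp only [specSum, Option.some.injEq] at h
    simp [finalSum, ← h]
  | cons p rest ih =>
    obtain ⟨c, q⟩ := p
    intro s h hres acc
    simp only [specSum] at h
    cases hM : M.get? c with
    | some v =>
      simp only [hM] at h
      cases hr : specSum G M f rest with
      | none => simp [hr] at h
      | some s' =>
        simp only [hr, Option.some.injEq] at h
        have := ih hr (fun c' q' vc hm hM' hv => hres c' q' vc (List.mem_cons_of_mem _ hm) hM' hv)
          (acc + q * (1 + v))
        simp only [finalSum, hM, this]
        rw [← h]; ring
    | none =>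
      simp only [hM] at h
      cases hc : specF G M f c with
      | none => simp [hc] at h
      | some vc =>
        simp only [hc] at h
        cases hr : specSum G M f rest with
        | none => simp [hr] at h
        | some s' =>
          simp only [hr, Option.some.injEq] at h
          have hT : T.get? c = some vc := hres c q vc (List.mem_cons_self ..) hM hc
          have hgd : T.getD c 0 = vc := PySem.Dict.getD_of_get?_eq_some T 0 hT
          have := ih hr (fun c' q' vc' hm hM' hv => hres c' q' vc' (List.mem_cons_of_mem _ hm) hM' hv)
            (acc + q * (1 + vc))
          simp only [finalSum, hM, hgd, this]
          rw [← h]; ring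

-- ===== VERDICT (by name: the statement is the Claim_ definition above) =====
theorem find_number_children_spec : Claim_equal_find_number_children := by
  intro parent g ch _hDom hPre
  unfold Spec_find_number_children
  obtain ⟨h1, h2⟩ := hPre
  -- common abbreviations (definitionally the ones in both ports)
  have hknd : (PySem.Dict.ofList g).keys.Nodup := PySem.Dict.nodup_keys_ofList g
  set G := PySem.Dict.ofList g with hGdef
  set M := PySem.Dict.ofList (ch.getD []) with hMdef
  set R := reachFrom G M (PySem.Set.ofList [parent]) with hRdef
  have hRkeys : R ⊆ G.keys := by
    intro k hk
    rw [← PySem.Dict.contains_iff_mem_keys]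
    exact h1 k hk
  have hndS0 : (PySem.Set.ofList [parent]).Nodup := PySem.Set.nodup_ofList _
  have hRclosed : ∀ k ∈ R, ∀ c ∈ succsOf G M k, c ∈ R :=
    reach_closed G M hndS0 hRkeys
  have hpR : parent ∈ R := by
    apply subset_iterR G M _ _
    rw [PySem.Set.mem_ofList]
    exact List.mem_singleton.mpr rfl
  have hconp : G.contains parent = true := h1 parent hpR
  have hsomeg : (G.get? parent).isSome := by
    rw [← PySem.Dict.contains_eq_isSome_get?, hconp]
  obtain ⟨lst, hGp⟩ := Option.isSome_iff_exists.mp hsomeg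
  -- the spec value exists at fuel rank+1 ≤ size+1
  obtain ⟨v, hv⟩ := spec_exists G M hRclosed hRkeys h2 ((descOf G M parent).length + 1)
    parent hpR (Nat.lt_succ_self _)
  have hdesc_keys : descOf G M parent ⊆ G.keys :=
    fun x hx => hRkeys (desc_subset G M hRclosed hpR hx)
  have hdnd : (descOf G M parent).Nodup := nodup_iterR G M _ _ (nodup_succsOf G M parent)
  have hbound : (descOf G M parent).length ≤ G.size := by
    have := (hdnd.subperm hdesc_keys).length_le
    rw [keys_length_eq_size] at this
    exact this
  have hvBig : specF G M (G.size + 1) parent = some v := specF_le G M (by omega) hv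
  -- A returns v
  have hExt : ExtD G M M := ⟨fun _ _ h => h, fun k v h => Or.inl h⟩
  obtain ⟨ch', hA, _⟩ := fncA_correct G M (G.size + 1) parent M v hExt hvBig
  have hAval : find_number_children parent g ch = v := by
    simp only [find_number_children, ← hGdef, ← hMdef, hA]
  -- B returns v
  have hSum : specSum G M G.size lst = some v := by
    simp only [specF, hGp] at hvBig
    exact hvBig
  have hit : ∀ p ∈ G.items, G.get? p.1 = some p.2 := by
    intro p hp
    exact PySem.Dict.get?_of_mem_items G (by exact hp) hknd
  have hSemp : SoundT G M PySem.Dict.empty := by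
    intro k v h
    rw [PySem.Dict.get?_empty] at h
    cases h
  have hTres : ∀ c q vc, (c, q) ∈ lst → M.get? c = none → specF G M G.size c = some vc →
      (itT M G.items (G.size + 1) PySem.Dict.empty).get? c = some vc := by
    intro c q vc _ hM hvc
    exact itT_complete G M hit (G.size + 1) _ hSemp c vc (specF_le G M (Nat.le_succ _) hvc) hM
  have hBval : find_number_children_alt parent g ch = v := by
    simp only [find_number_children_alt, ← hGdef, ← hMdef, hGp, roundsB_eq_itT]
    rw [finalSum_spec G M _ hSum (fun c q vc hm hM hv => hTres c q vc hm hM hv) 0]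
    omega
  rw [hAval, hBval]
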